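-- pv_equiv track=rewrite | github.com/renta0426/NVIDIA-Nemotron-Model-Reasoning-Challenge | cuda-train-data-analysis-v1/bit_synth_exact_trace_cot_v1/generate_bit_synth_exact_trace_cot_v1.py | recover_unique_bijection_mapping
-- ===== SOURCE A (Python) =====
-- def recover_unique_bijection_mapping(
--     candidate_sets: list[list[tuple[int, int]]],
-- ) -> tuple[tuple[tuple[int, int], ...] | None, int]:
--     if any(not candidates for candidates in candidate_sets):
--         return None, 0
--     order = sorted(range(8), key=lambda index: (len(candidate_sets[index]), index))
--     assignments: list[tuple[tuple[int, int], ...]] = []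
--
--     def backtrack(position: int, used_inputs: set[int], partial: dict[int, tuple[int, int]]) -> None:
--         if len(assignments) > 1:
--             return
--         if position >= len(order):
--             assignments.append(tuple(partial[index] for index in range(8)))
--             return
--         output_index = order[position]
--         for input_index, flip in candidate_sets[output_index]:
--             if input_index in used_inputs:
--                 continue
--             used_inputs.add(input_index)
--             partial[output_index] = (input_index, flip)
--             backtrack(position + 1, used_inputs, partial)
--             partial.pop(output_index, None)
--             used_inputs.remove(input_index)
--             if len(assignments) > 1:
--                 return
--
--     backtrack(0, set(), {})
--     return (assignments[0] if len(assignments) == 1 else None), len(assignments)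
-- ===== SOURCE B (Python) =====
-- def recover_unique_bijection_mapping(
--     candidate_sets: list[list[tuple[int, int]]],
-- ) -> tuple[tuple[tuple[int, int], ...] | None, int]:
--     if any(not candidates for candidates in candidate_sets):
--         return None, 0
--     order = sorted(range(8), key=lambda index: (len(candidate_sets[index]), index))
--     found = []
--     stack = [(0, candidate_sets[order[0]], frozenset(), ())]
--     while stack and len(found) < 2:
--         position, cands, used, partial = stack.pop()
--         if not cands:
--             continue
--         (input_index, flip), rest = cands[0], cands[1:]
--         stack.append((position, rest, used, partial))
--         if input_index in used:
--             continue
--         entry = (order[position], (input_index, flip))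
--         if position + 1 == len(order):
--             mapping = dict(partial + (entry,))
--             found.append(tuple(mapping[index] for index in range(8)))
--         else:
--             stack.append((position + 1, candidate_sets[order[position + 1]],
--                           used | {input_index}, partial + (entry,)))
--     return (found[0] if len(found) == 1 else None), len(found)
-- ===== Notes on version B (the rewrite author's own statement) =====
-- stated objective: alternative
-- what changed: The recursive backtracking closure with shared mutable state (a set, a dict, a nonlocal results list, post-call undo) is replaced by an iterative worklist loop over immutable frames (position, remaining candidates, frozenset, tuple partial) popped from an explicit stack until two solutions are found.
import Mathlib
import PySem

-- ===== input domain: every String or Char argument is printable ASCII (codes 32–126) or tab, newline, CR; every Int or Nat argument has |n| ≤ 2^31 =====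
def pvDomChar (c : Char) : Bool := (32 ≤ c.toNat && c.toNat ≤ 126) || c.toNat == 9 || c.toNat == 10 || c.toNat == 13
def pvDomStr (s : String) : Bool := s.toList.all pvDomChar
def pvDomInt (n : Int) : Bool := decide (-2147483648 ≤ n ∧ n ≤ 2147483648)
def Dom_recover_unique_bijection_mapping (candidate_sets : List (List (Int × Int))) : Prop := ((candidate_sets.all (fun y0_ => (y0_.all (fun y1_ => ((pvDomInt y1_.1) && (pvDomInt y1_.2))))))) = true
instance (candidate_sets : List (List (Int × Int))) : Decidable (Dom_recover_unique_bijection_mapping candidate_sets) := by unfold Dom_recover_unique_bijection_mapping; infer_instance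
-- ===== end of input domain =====

-- B replaces A's recursive backtracking closure (mutable set/dict state, undo after the
-- recursive call, nonlocal results list) by an iterative loop over an explicit stack of
-- immutable frames; same search order and same early stop after two solutions ("alternative").

-- ===== PORT A =====
-- tuple(partial[index] for index in range(8)); under Pre_ every key 0..7 is present,
-- the .getD (0,0) default is never read (Python would raise KeyError there).
def pvReadA (part : PySem.Dict Int (Int × Int)) : List (Int × Int) :=
  (PySem.List.pyRange 0 8 1).map (fun i => (PySem.Dict.get? part i).getD (0, 0))

-- backtrack(position, used_inputs, partial): `position` is carried as the number of
-- remaining levels k (position = order.length - k), so the recursion is structural on k.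
-- assignments is threaded as `acc`; the `for input_index, flip in candidate_sets[output_index]`
-- loop is the foldl, whose leading `acc.length > 1` test realises Python's early
-- `return` out of the loop (later iterations leave the state unchanged);
-- partial.pop / used_inputs.remove need no counterpart (state is threaded immutably).
def pvBtGo (csets : List (List (Int × Int))) (order : List Int) :
    Nat → PySem.Set Int → PySem.Dict Int (Int × Int) →
    List (List (Int × Int)) → List (List (Int × Int))
  | 0, _, part, acc => if acc.length > 1 then acc else acc ++ [pvReadA part]
  | k + 1, used, part, acc =>
    if acc.length > 1 then acc
    else
      (PySem.List.pyGetD csets (PySem.List.pyGetD order ((order.length - (k + 1) : Nat) : Int) 0) []).foldl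
        (fun acc c =>
          if acc.length > 1 then acc
          else if PySem.Set.contains used c.1 then acc
          else pvBtGo csets order k (PySem.Set.add used c.1)
            (PySem.Dict.insert part (PySem.List.pyGetD order ((order.length - (k + 1) : Nat) : Int) 0) c) acc)
        acc

def recover_unique_bijection_mapping (candidate_sets : List (List (Int × Int))) :
    (Option (List (Int × Int))) × Int :=
  if candidate_sets.any (fun c => c.isEmpty) then (none, 0)
  else
    let order := PySem.List.sorted2 (PySem.List.pyRange 0 8 1)
      (fun i => ((PySem.List.pyGetD candidate_sets i []).length : Int)) (fun i => i)
    let asg := pvBtGo candidate_sets order order.length PySem.Set.empty PySem.Dict.empty []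
    ((if asg.length = 1 then PySem.List.pyGet? asg 0 else none), (asg.length : Int))

-- ===== PORT B =====
-- tuple(mapping[index] for index in range(8)) after mapping = dict(partial + (entry,));
-- under Pre_ every key 0..7 is present so the default is never read.
def pvReadB (part : List (Int × (Int × Int))) : List (Int × Int) :=
  (PySem.List.pyRange 0 8 1).map (fun i => (PySem.Dict.get? (PySem.Dict.ofList part) i).getD (0, 0))

def pvMaxLen (csets : List (List (Int × Int))) : Nat :=
  csets.foldl (fun m c => max m c.length) 0

-- purely a termination measure for pvRunB (weight of one frame's search subtree)
def pvV (L : Nat) : Nat → Nat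
  | 0 => 1
  | k + 1 => L * pvV L k + 2

theorem pvV_pos (L k : Nat) : 1 ≤ pvV L k := by
  cases k <;> simp [pvV]

theorem pvLen_pyGetD_le (csets : List (List (Int × Int))) (i : Int) :
    (PySem.List.pyGetD csets i ([] : List (Int × Int))).length ≤ pvMaxLen csets := by
  rcases h : PySem.List.pyGet? csets i with _ | c
  · simp [PySem.List.pyGetD, h]
  · have hm := PySem.List.mem_of_pyGet?_eq_some csets h
    have := (PySem.List.le_foldl_max_nat csets List.length 0).2 c hm
    simpa [PySem.List.pyGetD, h, pvMaxLen] using this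

def pvWeight (csets : List (List (Int × Int))) (order : List Int)
    (fr : Nat × List (Int × Int) × PySem.Set Int × List (Int × (Int × Int))) : Nat :=
  fr.2.1.length * pvV (pvMaxLen csets) (order.length - fr.1) + 1

-- the three ways one loop step shrinks the total stack weight (cited by the
-- termination proof of pvRunB and by the simulation lemma pvB_char below)
theorem pvW_nil (csets : List (List (Int × Int))) (order : List Int) (pos : Nat)
    (u : PySem.Set Int) (p : List (Int × (Int × Int)))
    (stack : List (Nat × List (Int × Int) × PySem.Set Int × List (Int × (Int × Int)))) :
    (stack.map (pvWeight csets order)).sum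
      < (((pos, ([] : List (Int × Int)), u, p) :: stack).map (pvWeight csets order)).sum := by
  simp only [List.map_cons, List.sum_cons, pvWeight, List.length_nil]
  omega

theorem pvW_sib (csets : List (List (Int × Int))) (order : List Int) (pos : Nat)
    (x f : Int) (rest : List (Int × Int)) (u : PySem.Set Int) (p : List (Int × (Int × Int)))
    (stack : List (Nat × List (Int × Int) × PySem.Set Int × List (Int × (Int × Int)))) :
    (((pos, rest, u, p) :: stack).map (pvWeight csets order)).sum
      < (((pos, (x, f) :: rest, u, p) :: stack).map (pvWeight csets order)).sum := by
  simp only [List.map_cons, List.sum_cons, pvWeight, List.length_cons]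
  have h := pvV_pos (pvMaxLen csets) (order.length - pos)
  have e : (rest.length + 1) * pvV (pvMaxLen csets) (order.length - pos)
      = rest.length * pvV (pvMaxLen csets) (order.length - pos)
        + pvV (pvMaxLen csets) (order.length - pos) := by
    rw [Nat.succ_mul]
  omega

theorem pvW_child (csets : List (List (Int × Int))) (order : List Int) (pos : Nat)
    (h : ¬ order.length ≤ pos + 1) (x f : Int) (rest : List (Int × Int))
    (u u2 : PySem.Set Int) (p p2 : List (Int × (Int × Int)))
    (stack : List (Nat × List (Int × Int) × PySem.Set Int × List (Int × (Int × Int)))) :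
    (((pos + 1, PySem.List.pyGetD csets (PySem.List.pyGetD order ((pos : Int) + 1) 0) [], u2, p2)
        :: (pos, rest, u, p) :: stack).map (pvWeight csets order)).sum
      < (((pos, (x, f) :: rest, u, p) :: stack).map (pvWeight csets order)).sum := by
  simp only [List.map_cons, List.sum_cons, pvWeight, List.length_cons]
  have hk : order.length - pos = (order.length - (pos + 1)) + 1 := by omega
  rw [hk]
  simp only [pvV]
  have hc := pvLen_pyGetD_le csets (PySem.List.pyGetD order ((pos : Int) + 1) 0)
  have hmul := Nat.mul_le_mul_right (pvV (pvMaxLen csets) (order.length - (pos + 1))) hc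
  have e : (rest.length + 1) * (pvMaxLen csets * pvV (pvMaxLen csets) (order.length - (pos + 1)) + 2)
      = rest.length * (pvMaxLen csets * pvV (pvMaxLen csets) (order.length - (pos + 1)) + 2)
        + (pvMaxLen csets * pvV (pvMaxLen csets) (order.length - (pos + 1)) + 2) := by
    rw [Nat.succ_mul]
  omega

-- the while loop over the explicit stack; frames are (position, remaining candidates,
-- used frozenset, partial tuple).  The Python test `position + 1 == len(order)` is ported
-- as `order.length ≤ pos + 1` (equal on every reachable frame, where pos < len(order)).
def pvRunB (csets : List (List (Int × Int))) (order : List Int) :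
    List (Nat × List (Int × Int) × PySem.Set Int × List (Int × (Int × Int))) →
    List (List (Int × Int)) → List (List (Int × Int))
  | [], found => found
  | (pos, cands, used, part) :: stack, found =>
    if 2 ≤ found.length then found
    else
      match cands with
      | [] => pvRunB csets order stack found
      | (x, f) :: rest =>
        if PySem.Set.contains used x then
          pvRunB csets order ((pos, rest, used, part) :: stack) found
        else
          if _h2 : order.length ≤ pos + 1 then
            pvRunB csets order ((pos, rest, used, part) :: stack)
              (found ++ [pvReadB (part ++ [(PySem.List.pyGetD order pos 0, (x, f))])])
          else
            pvRunB csets order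
              ((pos + 1, PySem.List.pyGetD csets (PySem.List.pyGetD order (pos + 1) 0) [],
                 PySem.Set.union used [x],
                 part ++ [(PySem.List.pyGetD order pos 0, (x, f))]) ::
               (pos, rest, used, part) :: stack) found
  termination_by stack _found => (stack.map (pvWeight csets order)).sum
  decreasing_by
  · exact pvW_nil csets order pos used part stack
  · exact pvW_sib csets order pos x f rest used part stack
  · exact pvW_sib csets order pos x f rest used part stack
  · exact pvW_child csets order pos _h2 x f rest used _ part _ stack

def recover_unique_bijection_mapping_alt (candidate_sets : List (List (Int × Int))) :
    (Option (List (Int × Int))) × Int :=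
  if candidate_sets.any (fun c => c.isEmpty) then (none, 0)
  else
    let order := PySem.List.sorted2 (PySem.List.pyRange 0 8 1)
      (fun i => ((PySem.List.pyGetD candidate_sets i []).length : Int)) (fun i => i)
    let found := pvRunB candidate_sets order
      [(0, PySem.List.pyGetD candidate_sets (PySem.List.pyGetD order 0 0) [],
        PySem.Set.empty, [])] []
    ((if found.length = 1 then PySem.List.pyGet? found 0 else none), (found.length : Int))

-- ===== PRECONDITION & SPEC =====
-- Pre_ excludes exactly the inputs where Python A raises: fewer than 8 candidate lists
-- while none of them is empty (then sorted(range(8), key=...) hits an IndexError).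
def Pre_recover_unique_bijection_mapping (candidate_sets : List (List (Int × Int))) : Prop :=
  8 ≤ candidate_sets.length ∨ [] ∈ candidate_sets
instance (candidate_sets : List (List (Int × Int))) : Decidable (Pre_recover_unique_bijection_mapping candidate_sets) := by unfold Pre_recover_unique_bijection_mapping; infer_instance

def pvWitness_recover_unique_bijection_mapping : (List (List (Int × Int))) :=
  [[(0, 0)], [(1, 0)], [(2, 0)], [(3, 0)], [(4, 0)], [(5, 0)], [(6, 0)], [(7, 0)]]

def Spec_recover_unique_bijection_mapping (candidate_sets : List (List (Int × Int))) (out : (Option (List (Int × Int))) × Int) : Prop := out = recover_unique_bijection_mapping_alt candidate_sets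
instance (candidate_sets : List (List (Int × Int))) (out : (Option (List (Int × Int))) × Int) : Decidable (Spec_recover_unique_bijection_mapping candidate_sets out) := by unfold Spec_recover_unique_bijection_mapping; infer_instance

-- ===== CLAIM (what is proved, stated in full; the proofs are below) =====
def Claim_equal_recover_unique_bijection_mapping : Prop := ∀ (candidate_sets : List (List (Int × Int))), Dom_recover_unique_bijection_mapping candidate_sets → Pre_recover_unique_bijection_mapping candidate_sets → Spec_recover_unique_bijection_mapping candidate_sets (recover_unique_bijection_mapping candidate_sets)

-- ===== LEMMAS AND PROOFS =====

-- the readout function a partial dict / partial tuple denotes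
def pvPf (pl : List (Int × (Int × Int))) : Int → Int × Int :=
  fun i => (PySem.Dict.get? (PySem.Dict.ofList pl) i).getD (0, 0)

-- reference enumeration of all completions of one level, in the common DFS order of A and B
def pvCandSols (child : PySem.Set Int → (Int → Int × Int) → List (List (Int × Int)))
    (oidx : Int) (cands : List (Int × Int)) (used : PySem.Set Int) (pf : Int → Int × Int) :
    List (List (Int × Int)) :=
  cands.flatMap (fun c =>
    if PySem.Set.contains used c.1 then []
    else child (PySem.Set.add used c.1) (fun i => if i == oidx then c else pf i))

-- all completions with k levels remaining (position = order.length - k)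
def pvSols (csets : List (List (Int × Int))) (order : List Int) :
    Nat → PySem.Set Int → (Int → Int × Int) → List (List (Int × Int))
  | 0, _, pf => [(PySem.List.pyRange 0 8 1).map pf]
  | k + 1, used, pf =>
    pvCandSols (pvSols csets order k)
      (PySem.List.pyGetD order ((order.length - (k + 1) : Nat) : Int) 0)
      (PySem.List.pyGetD csets (PySem.List.pyGetD order ((order.length - (k + 1) : Nat) : Int) 0) [])
      used pf

def pvFS (csets : List (List (Int × Int))) (order : List Int)
    (fr : Nat × List (Int × Int) × PySem.Set Int × List (Int × (Int × Int))) :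
    List (List (Int × Int)) :=
  pvCandSols (pvSols csets order (order.length - fr.1 - 1)) (PySem.List.pyGetD order (fr.1 : Int) 0)
    fr.2.1 fr.2.2.1 (pvPf fr.2.2.2)

theorem pvFS_mk (csets : List (List (Int × Int))) (order : List Int) (pos : Nat)
    (cands : List (Int × Int)) (used : PySem.Set Int) (part : List (Int × (Int × Int))) :
    pvFS csets order (pos, cands, used, part)
      = pvCandSols (pvSols csets order (order.length - pos - 1))
          (PySem.List.pyGetD order (pos : Int) 0) cands used (pvPf part) := rfl

theorem pvPf_append (pl : List (Int × (Int × Int))) (k : Int) (v : Int × Int) :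
    pvPf (pl ++ [(k, v)]) = fun i => if i == k then v else pvPf pl i := by
  funext i
  unfold pvPf
  have hof : PySem.Dict.ofList (pl ++ [(k, v)]) = (PySem.Dict.ofList pl).insert k v := by
    simp [PySem.Dict.ofList, PySem.Dict.update, List.foldl_append]
  rw [hof]
  by_cases hio : i = k
  · subst hio
    rw [PySem.Dict.get?_insert_self]
    simp
  · rw [PySem.Dict.get?_insert_of_ne _ _ hio]
    simp [hio]

theorem pvUnion_singleton (s : PySem.Set Int) (x : Int) :
    PySem.Set.union s [x] = PySem.Set.add s x := rfl

theorem pvSols_eq_candSols (csets : List (List (Int × Int))) (order : List Int) (pos : Nat)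
    (h : pos < order.length) (used : PySem.Set Int) (pf : Int → Int × Int) :
    pvSols csets order (order.length - pos) used pf
      = pvCandSols (pvSols csets order (order.length - pos - 1))
          (PySem.List.pyGetD order (pos : Int) 0)
          (PySem.List.pyGetD csets (PySem.List.pyGetD order (pos : Int) 0) []) used pf := by
  have hk : order.length - pos = (order.length - pos - 1) + 1 := by omega
  conv_lhs => rw [hk]
  rw [pvSols]
  have h2 : ((order.length - ((order.length - pos - 1) + 1) : Nat) : Int) = (pos : Int) := by
    have h3 : (order.length - ((order.length - pos - 1) + 1) : Nat) = pos := by omega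
    rw [h3]
  rw [h2]

theorem pvA_char (csets : List (List (Int × Int))) (order : List Int) :
    ∀ (k : Nat) (used : PySem.Set Int) (part : PySem.Dict Int (Int × Int))
      (pf : Int → Int × Int) (acc : List (List (Int × Int))),
      (∀ i : Int, (PySem.Dict.get? part i).getD (0, 0) = pf i) → acc.length ≤ 2 →
      pvBtGo csets order k used part acc = (acc ++ pvSols csets order k used pf).take 2 := by
  intro k
  induction k with
  | zero =>
    intro used part pf acc hinv hacc
    rw [pvBtGo, pvSols]
    by_cases hlen : acc.length > 1
    · rw [if_pos hlen, List.take_append_of_le_length (by omega), List.take_of_length_le (by omega)]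
    · rw [if_neg hlen]
      have hread : pvReadA part = (PySem.List.pyRange 0 8 1).map pf :=
        List.map_congr_left (fun i _ => hinv i)
      rw [hread, List.take_of_length_le (by simp; omega)]
  | succ k ihk =>
    intro used part pf acc hinv hacc
    rw [pvBtGo, pvSols]
    simp only [pvCandSols]
    by_cases hlen : acc.length > 1
    · rw [if_pos hlen, List.take_append_of_le_length (by omega), List.take_of_length_le (by omega)]
    · rw [if_neg hlen]
      set oidx := PySem.List.pyGetD order ((order.length - (k + 1) : Nat) : Int) 0 with hoidx
      have loop : ∀ (cands : List (Int × Int)) (acc : List (List (Int × Int))), acc.length ≤ 2 →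
          cands.foldl (fun acc c =>
            if acc.length > 1 then acc
            else if PySem.Set.contains used c.1 then acc
            else pvBtGo csets order k (PySem.Set.add used c.1)
              (PySem.Dict.insert part oidx c) acc) acc
          = (acc ++ cands.flatMap (fun c =>
              if PySem.Set.contains used c.1 then []
              else pvSols csets order k (PySem.Set.add used c.1)
                (fun i => if i == oidx then c else pf i))).take 2 := by
        intro cands
        induction cands with
        | nil =>
          intro acc hacc
          simp only [List.foldl_nil, List.flatMap_nil, List.append_nil]
          rw [List.take_of_length_le hacc]
        | cons c rest ih =>
          intro acc hacc
          simp only [List.foldl_cons, List.flatMap_cons]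
          by_cases hl2 : acc.length > 1
          · rw [if_pos hl2, ih acc hacc, List.take_append_of_le_length (by omega),
              List.take_append_of_le_length (by omega)]
          · rw [if_neg hl2]
            by_cases hx : PySem.Set.contains used c.1 = true
            · rw [if_pos hx, if_pos hx, ih acc hacc, List.nil_append]
            · rw [if_neg hx, if_neg hx]
              have hinv' : ∀ i : Int,
                  (PySem.Dict.get? (PySem.Dict.insert part oidx c) i).getD (0, 0)
                    = if i == oidx then c else pf i := by
                intro i
                by_cases hio : i = oidx
                · subst hio
                  rw [PySem.Dict.get?_insert_self]
                  simp
                · rw [PySem.Dict.get?_insert_of_ne part c hio]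
                  simp [hio, hinv i]
              have hacc' := ihk (PySem.Set.add used c.1) (PySem.Dict.insert part oidx c)
                (fun i => if i == oidx then c else pf i) acc hinv' hacc
              set S := pvSols csets order k (PySem.Set.add used c.1)
                (fun i => if i == oidx then c else pf i) with hS
              set A := pvBtGo csets order k (PySem.Set.add used c.1)
                (PySem.Dict.insert part oidx c) acc with hA
              by_cases h2 : 2 ≤ (acc ++ S).length
              · have hAl : A.length = 2 := by
                  rw [hacc', List.length_take]
                  omega
                rw [ih A (by omega), List.take_append_of_le_length (by omega),
                  List.take_of_length_le (by omega), hacc', ← List.append_assoc,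
                  List.take_append_of_le_length h2]
              · have heq : A = acc ++ S := by
                  rw [hacc', List.take_of_length_le (by omega)]
                rw [ih A (by rw [heq]; omega), heq, List.append_assoc]
      exact loop _ acc hacc

theorem pvB_char (csets : List (List (Int × Int))) (order : List Int) :
    ∀ (n : Nat) (stack : List (Nat × List (Int × Int) × PySem.Set Int × List (Int × (Int × Int))))
      (found : List (List (Int × Int))),
      (stack.map (pvWeight csets order)).sum ≤ n → found.length ≤ 2 →
      pvRunB csets order stack found
        = (found ++ (stack.map (pvFS csets order)).flatten).take 2 := by
  intro n
  induction n using Nat.strong_induction_on with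
  | _ n SIH =>
  intro stack found hn hf
  cases stack with
  | nil =>
    rw [pvRunB]
    simp only [List.map_nil, List.flatten_nil, List.append_nil]
    rw [List.take_of_length_le hf]
  | cons fr stack =>
    obtain ⟨pos, cands, used, part⟩ := fr
    by_cases hge : 2 ≤ found.length
    · rw [pvRunB.eq_def]
      dsimp only
      rw [if_pos hge, List.take_append_of_le_length (by omega), List.take_of_length_le (by omega)]
    · cases cands with
      | nil =>
        have hdec := pvW_nil csets order pos used part stack
        rw [pvRunB, if_neg hge,
          SIH _ (lt_of_lt_of_le hdec hn) stack found le_rfl hf]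
        simp only [List.map_cons, List.flatten_cons, pvFS_mk, pvCandSols, List.flatMap_nil,
          List.nil_append]
      | cons c rest =>
        obtain ⟨x, f⟩ := c
        by_cases hx : PySem.Set.contains used x = true
        · have hdec := pvW_sib csets order pos x f rest used part stack
          rw [pvRunB, if_neg hge, if_pos hx,
            SIH _ (lt_of_lt_of_le hdec hn) _ found le_rfl hf]
          simp only [List.map_cons, List.flatten_cons, pvFS_mk, pvCandSols, List.flatMap_cons]
          rw [if_pos hx, List.nil_append]
        · by_cases hleaf : order.length ≤ pos + 1
          · have hdec := pvW_sib csets order pos x f rest used part stack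
            have hf' : (found ++ [pvReadB (part ++ [(PySem.List.pyGetD order (pos : Int) 0, (x, f))])]).length ≤ 2 := by
              simp only [List.length_append, List.length_cons, List.length_nil]
              omega
            rw [pvRunB, if_neg hge, if_neg hx, dif_pos hleaf,
              SIH _ (lt_of_lt_of_le hdec hn) _ _ le_rfl hf']
            simp only [List.map_cons, List.flatten_cons, pvFS_mk, pvCandSols, List.flatMap_cons]
            rw [if_neg hx]
            have h0 : order.length - pos - 1 = 0 := by omega
            rw [h0, pvSols]
            rw [show pvReadB (part ++ [(PySem.List.pyGetD order (pos : Int) 0, (x, f))])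
                  = (PySem.List.pyRange 0 8 1).map
                      (pvPf (part ++ [(PySem.List.pyGetD order (pos : Int) 0, (x, f))])) from rfl,
              pvPf_append]
            simp only [List.append_assoc, List.cons_append, List.nil_append]
          · have hdec := pvW_child csets order pos hleaf x f rest used
              (PySem.Set.union used [x]) part
              (part ++ [(PySem.List.pyGetD order (pos : Int) 0, (x, f))]) stack
            rw [pvRunB, if_neg hge, if_neg hx, dif_neg hleaf,
              SIH _ (lt_of_lt_of_le hdec hn) _ found le_rfl hf]
            simp only [List.map_cons, List.flatten_cons, pvFS_mk, pvCandSols, List.flatMap_cons]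
            rw [if_neg hx]
            rw [show order.length - pos - 1 = order.length - (pos + 1) from by omega,
              pvSols_eq_candSols csets order (pos + 1) (by omega),
              pvUnion_singleton, pvPf_append]
            simp only [pvCandSols, Nat.cast_add, Nat.cast_one, List.append_assoc]

-- ===== VERDICT (by name: the statement is the Claim_ definition above) =====
theorem recover_unique_bijection_mapping_spec : Claim_equal_recover_unique_bijection_mapping := by
  unfold Claim_equal_recover_unique_bijection_mapping
  intro cs _ _
  unfold Spec_recover_unique_bijection_mapping
  unfold recover_unique_bijection_mapping recover_unique_bijection_mapping_alt
  by_cases hemp : cs.any (fun c => c.isEmpty) = true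
  · rw [if_pos hemp, if_pos hemp]
  · rw [if_neg hemp, if_neg hemp]
    set o := PySem.List.sorted2 (PySem.List.pyRange 0 8 1)
      (fun i => ((PySem.List.pyGetD cs i []).length : Int)) (fun i => i) with ho
    show ((if (pvBtGo cs o o.length PySem.Set.empty PySem.Dict.empty []).length = 1
            then PySem.List.pyGet? (pvBtGo cs o o.length PySem.Set.empty PySem.Dict.empty []) 0 else none),
          ((pvBtGo cs o o.length PySem.Set.empty PySem.Dict.empty []).length : Int))
        = ((if (pvRunB cs o [(0, PySem.List.pyGetD cs (PySem.List.pyGetD o 0 0) [], PySem.Set.empty, [])] []).length = 1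
            then PySem.List.pyGet? (pvRunB cs o [(0, PySem.List.pyGetD cs (PySem.List.pyGetD o 0 0) [], PySem.Set.empty, [])] []) 0 else none),
          ((pvRunB cs o [(0, PySem.List.pyGetD cs (PySem.List.pyGetD o 0 0) [], PySem.Set.empty, [])] []).length : Int))
    have ho8 : o.length = 8 := by
      rw [ho, (PySem.List.sorted2_perm _ _ _ false).length_eq, PySem.List.length_pyRange_one]
      decide
    have key : pvBtGo cs o o.length PySem.Set.empty PySem.Dict.empty []
        = pvRunB cs o [(0, PySem.List.pyGetD cs (PySem.List.pyGetD o 0 0) [], PySem.Set.empty, [])] [] := by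
      rw [pvA_char cs o o.length PySem.Set.empty PySem.Dict.empty
            (fun _ => ((0 : Int), (0 : Int))) [] (fun i => rfl) (by simp),
          pvB_char cs o _ _ [] le_rfl (by simp)]
      simp only [List.map_cons, List.map_nil, List.flatten_cons, List.flatten_nil,
        List.append_nil, List.nil_append, pvFS_mk, Nat.cast_zero, Nat.sub_zero]
      have hstep := pvSols_eq_candSols cs o 0 (by omega) PySem.Set.empty
        (fun _ => ((0 : Int), (0 : Int)))
      simp only [Nat.cast_zero, Nat.sub_zero] at hstep
      rw [hstep]
      exact rfl
    rw [key]
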